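-- pv_equiv track=rewrite | github.com/delaguilaluis/advent-of-code-2020 | 10/a.py | reduz
-- ===== SOURCE A (Python) =====
-- def reduz(numbers, accum):
--   if len(numbers) == 1:
--     return accum
--
--   accum.append(numbers[1] - numbers[0])
--
--   return reduz(
--     numbers[1:],
--     accum
--   )
-- ===== SOURCE B (Python) =====
-- def reduz(numbers, accum):
--   accum.extend(b - a for a, b in zip(numbers, numbers[1:]))
--   return accum
-- ===== Notes on version B (the rewrite author's own statement) =====
-- stated objective: idiomatic
-- what changed: Replaces A's recursion with repeated list slicing (O(n^2) copying) by a single zip of the list with its tail, extending accum with all pairwise differences in one pass.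
import Mathlib
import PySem

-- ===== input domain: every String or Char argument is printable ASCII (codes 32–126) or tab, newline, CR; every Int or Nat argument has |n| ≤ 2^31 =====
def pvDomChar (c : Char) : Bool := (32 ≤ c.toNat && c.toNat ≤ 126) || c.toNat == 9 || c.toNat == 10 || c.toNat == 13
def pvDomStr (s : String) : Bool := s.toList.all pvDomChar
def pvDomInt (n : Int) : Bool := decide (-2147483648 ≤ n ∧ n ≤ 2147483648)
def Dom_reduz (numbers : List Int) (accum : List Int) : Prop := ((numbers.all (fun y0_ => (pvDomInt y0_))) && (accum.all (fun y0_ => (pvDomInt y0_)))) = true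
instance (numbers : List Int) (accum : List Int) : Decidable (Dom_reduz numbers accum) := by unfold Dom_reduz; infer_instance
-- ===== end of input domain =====

-- B replaces A's recursion-with-slicing by a single zip pass appending all
-- consecutive differences at once (both mutate accum in Python; the proof is
-- about the return value, which is the same object here).

-- ===== PORT A =====
-- literal port of A: recursion on numbers[1:], appending numbers[1] - numbers[0]
def reduz (numbers : List Int) (accum : List Int) : List Int :=
  if numbers.length = 1 then accum
  else
    match h1 : PySem.List.pyGet? numbers 1, PySem.List.pyGet? numbers 0 with
    | some x1, some x0 =>
        reduz (PySem.List.slice numbers (some 1) none) (accum ++ [x1 - x0])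
    | _, _ => accum  -- IndexError (numbers = []); excluded by Pre_reduz
termination_by numbers.length
decreasing_by
  have hne : numbers ≠ [] := by
    rintro rfl; simp [PySem.List.pyGet?, PySem.List.pyIdx?] at h1
  simp [PySem.List.slice_from_one]
  cases numbers with
  | nil => exact absurd rfl hne
  | cons a t => simp

-- ===== PORT B =====
def reduz_alt (numbers : List Int) (accum : List Int) : List Int :=
  accum ++ (numbers.zip (PySem.List.slice numbers (some 1) none)).map (fun p => p.2 - p.1)

-- ===== PRECONDITION & SPEC =====
-- Pre_ excludes only the empty numbers list, on which A raises IndexError.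
def Pre_reduz (numbers : List Int) (accum : List Int) : Prop := numbers ≠ []
instance (numbers : List Int) (accum : List Int) : Decidable (Pre_reduz numbers accum) := by unfold Pre_reduz; infer_instance
def pvWitness_reduz : List Int × List Int := ([1, 3, 6], [7])

def Spec_reduz (numbers : List Int) (accum : List Int) (out : List Int) : Prop := out = reduz_alt numbers accum
instance (numbers : List Int) (accum : List Int) (out : List Int) : Decidable (Spec_reduz numbers accum out) := by unfold Spec_reduz; infer_instance

-- ===== CLAIM (what is proved, stated in full; the proofs are below) =====
def Claim_equal_reduz : Prop := ∀ (numbers : List Int) (accum : List Int), Dom_reduz numbers accum → Pre_reduz numbers accum → Spec_reduz numbers accum (reduz numbers accum)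

-- ===== LEMMAS AND PROOFS =====

theorem reduz_eq_diffs : ∀ (numbers accum : List Int), numbers ≠ [] →
    reduz numbers accum = accum ++ (numbers.zip numbers.tail).map (fun p => p.2 - p.1) := by
  intro numbers
  induction numbers with
  | nil => intro accum h; exact absurd rfl h
  | cons a t ih =>
    intro accum _
    cases t with
    | nil => simp [reduz]
    | cons b t' =>
      have e1 : PySem.List.pyGet? (a :: b :: t') 1 = some b := by
        show PySem.List.pyGet? (a :: b :: t') ((1 : Nat) : Int) = some b
        rw [PySem.List.pyGet?_natCast]; rfl
      have e0 : PySem.List.pyGet? (a :: b :: t') 0 = some a :=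
        PySem.List.pyGet?_zero_cons a _
      rw [reduz, if_neg (by simp)]
      split
      next x1 x0 h1 h0 =>
        rw [e1] at h1; rw [e0] at h0
        obtain rfl := Option.some.inj h1
        obtain rfl := Option.some.inj h0
        rw [PySem.List.slice_from_one, List.tail_cons,
          ih (accum ++ [b - a]) (by simp)]
        simp
      next h =>
        exact (h b a e1 e0).elim

-- ===== VERDICT (by name: the statement is the Claim_ definition above) =====
theorem reduz_spec : Claim_equal_reduz := by
  intro numbers accum _ hpre
  unfold Spec_reduz reduz_alt
  rw [reduz_eq_diffs numbers accum hpre, PySem.List.slice_from_one]
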